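-- pv_equiv track=rewrite | github.com/pypi-data/pypi-mirror-400 | packages/rom24-quickmud-python/rom24_quickmud_python-2.5.4.tar.gz/rom24_quickmud_python-2.5.4/mud/utils/text.py | format_rom_string
-- ===== SOURCE A (Python) =====
-- def format_rom_string(text: str | None) -> str:
--     """Apply ROM's format_string rules to builder-edited descriptions."""
--     if not text:
--         return ""
--
--     raw = text
--     xbuf: list[str] = []
--     cap = True
--     idx = 0
--     length = len(raw)
--
--     while idx < length:
--         ch = raw[idx]
--         next_char = raw[idx + 1] if idx + 1 < length else None
--
--         if ch == "\r":
--             idx += 1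
--             continue
--         if ch == "\n":
--             if xbuf and xbuf[-1] != " ":
--                 xbuf.append(" ")
--             idx += 1
--             continue
--         if ch == " ":
--             if xbuf and xbuf[-1] != " ":
--                 xbuf.append(" ")
--             idx += 1
--             continue
--         if ch == ")":
--             if len(xbuf) >= 3 and xbuf[-1] == " " and xbuf[-2] == " " and xbuf[-3] in ".?!":
--                 xbuf[-2] = ")"
--                 xbuf[-1] = " "
--                 xbuf.append(" ")
--             else:
--                 xbuf.append(")")
--             idx += 1
--             continue
--         if ch in ".?!":
--             skip_quote = False
--             if len(xbuf) >= 3 and xbuf[-1] == " " and xbuf[-2] == " " and xbuf[-3] in ".?!":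
--                 xbuf[-2] = ch
--                 if next_char != '"':
--                     xbuf[-1] = " "
--                     xbuf.append(" ")
--                 else:
--                     xbuf[-1] = '"'
--                     xbuf.append(" ")
--                     xbuf.append(" ")
--                     skip_quote = True
--             else:
--                 xbuf.append(ch)
--                 if next_char != '"':
--                     xbuf.append(" ")
--                     xbuf.append(" ")
--                 else:
--                     xbuf.append('"')
--                     xbuf.append(" ")
--                     xbuf.append(" ")
--                     skip_quote = True
--             cap = True
--             idx += 1
--             if skip_quote:
--                 idx += 1
--             continue
--
--         xbuf.append(raw[idx].upper() if cap else raw[idx])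
--         cap = False
--         idx += 1
--
--     collapsed = "".join(xbuf).strip()
--     if not collapsed:
--         return ""
--
--     lines: list[str] = []
--     remainder = collapsed
--     first_line = True
--     while len(remainder) > 77:
--         limit = 73 if first_line else 76
--         break_at = None
--         search_limit = min(limit, len(remainder) - 1)
--         for pos in range(search_limit, 0, -1):
--             if remainder[pos] == " ":
--                 break_at = pos
--                 break
--         if break_at is not None:
--             lines.append(remainder[:break_at])
--             remainder = remainder[break_at + 1 :].lstrip(" ")
--         else:
--             lines.append(remainder[:76] + "-")
--             remainder = remainder[76:]
--         first_line = False
--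
--     remainder = remainder.rstrip(" \n\r")
--     if remainder:
--         lines.append(remainder)
--
--     formatted = "\n".join(lines)
--     if not formatted.endswith("\n"):
--         formatted += "\n"
--     return formatted
-- ===== SOURCE B (Python) =====
-- def format_rom_string(text):
--     if not text:
--         return ""
--
--     # Stage 1: newlines behave exactly like spaces in the collapse, so map them
--     # away up front ('\r' cannot be pre-removed: the quote lookahead may see it,
--     # so the machine still skips it inline).
--     s = text.replace("\n", " ")
--
--     # Stage 2: lazy whitespace machine.  'pending' counts gap spaces still owed
--     # before the next visible character; 'sent' marks a sentence gap, letting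
--     # ')' / extra terminators slide in front of it, instead of eager appending
--     # plus negative-index rewriting of the buffer tail.
--     out = []
--     cap = True
--     pending = 0
--     sent = False
--     k = 0
--     m = len(s)
--     while k < m:
--         ch = s[k]
--         k += 1
--         if ch == "\r":
--             continue
--         if ch == " ":
--             if out and pending == 0:
--                 pending = 1
--             continue
--         if ch == ")":
--             if sent:
--                 out.append(")")
--                 sent = False
--             else:
--                 out.append(" " * pending + ")")
--                 pending = 0
--             continue
--         if ch in ".?!":
--             out.append(ch if sent else " " * pending + ch)
--             if k < m and s[k] == '"':
--                 out.append('"')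
--                 k += 1
--                 sent = False
--             else:
--                 sent = True
--             pending = 2
--             cap = True
--             continue
--         out.append(" " * pending + (ch.upper() if cap else ch))
--         pending = 0
--         sent = False
--         cap = False
--
--     rem = "".join(out).strip()
--     if not rem:
--         return ""
--
--     # Stage 3: wrap by walking index positions over the one collapsed string
--     # (a start pointer plus in-place scans), never slicing off a remainder.
--     n = len(rem)
--     lines = []
--     start = 0
--     first = True
--     while n - start > 77:
--         limit = 73 if first else 76
--         brk = -1
--         i = start + 1
--         while i <= start + limit:
--             if rem[i] == " ":
--                 brk = i
--             i += 1
--         if brk >= 0: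
--             lines.append(rem[start:brk])
--             start = brk + 1
--             while start < n and rem[start] == " ":
--                 start += 1
--         else:
--             lines.append(rem[start : start + 76] + "-")
--             start += 76
--         first = False
--     lines.append(rem[start:])
--     return "\n".join(lines) + "\n"
-- ===== Notes on version B (the rewrite author's own statement) =====
-- stated objective: alternative
-- what changed: B is staged differently: newlines are pre-mapped to spaces, the normalization keeps a lazy pending-space counter plus a sentence flag flushed in front of the next visible character instead of eager gap spaces retroactively rewritten through negative-index mutation, and the wrapper walks index positions over the single collapsed string with a start pointer and a forward last-space scan instead of repeatedly slicing off a remainder and scanning it backwards; the dead min()/rstrip/endswith steps that can never act on collapsed text are dropped.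
import Mathlib
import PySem

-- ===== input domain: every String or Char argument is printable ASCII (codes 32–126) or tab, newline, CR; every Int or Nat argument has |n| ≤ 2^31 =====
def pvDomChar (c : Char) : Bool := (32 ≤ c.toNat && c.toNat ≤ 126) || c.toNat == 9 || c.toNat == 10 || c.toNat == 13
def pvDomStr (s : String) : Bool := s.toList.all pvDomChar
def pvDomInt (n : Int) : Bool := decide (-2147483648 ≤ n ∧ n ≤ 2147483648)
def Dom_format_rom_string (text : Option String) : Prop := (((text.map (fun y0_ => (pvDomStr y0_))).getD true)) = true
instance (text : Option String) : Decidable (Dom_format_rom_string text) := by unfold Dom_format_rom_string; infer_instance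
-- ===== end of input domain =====

-- B restages the job: newlines are pre-mapped to spaces, the collapse keeps a lazy
-- pending-space counter instead of eager spaces rewritten through negative indices,
-- and the wrapper walks a start pointer over one string instead of slicing off a
-- remainder per line; same return value, neither program mutates its argument.

-- ===== PORT A =====

-- `ch in ".?!"` in A
def pvPunctA (c : Char) : Bool := c == '.' || c == '?' || c == '!'

-- A's test `len(xbuf) >= 3 and xbuf[-1] == " " and xbuf[-2] == " " and xbuf[-3] in ".?!"`
def pvSentA (xbuf : List Char) : Bool :=
  decide (3 ≤ xbuf.length) && (PySem.List.pyGetD xbuf (-1) 'x' == ' ')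
    && (PySem.List.pyGetD xbuf (-2) 'x' == ' ') && pvPunctA (PySem.List.pyGetD xbuf (-3) 'x')

-- A's main while-loop (idx advances by 1, or 2 when a quote is consumed);
-- the structural fuel only makes the loop total: raw.length + 1 always suffices
def pvNormA (raw : List Char) : Nat → Nat → List Char → Bool → List Char
  | 0, _, xbuf, _ => xbuf
  | fuel+1, idx, xbuf, cap =>
    if h : idx < raw.length then
      if raw[idx] = '\r' then pvNormA raw fuel (idx+1) xbuf cap
      else if raw[idx] = '\n' then
        pvNormA raw fuel (idx+1) (if xbuf ≠ [] ∧ PySem.List.pyGetD xbuf (-1) 'x' ≠ ' ' then xbuf ++ [' '] else xbuf) cap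
      else if raw[idx] = ' ' then
        pvNormA raw fuel (idx+1) (if xbuf ≠ [] ∧ PySem.List.pyGetD xbuf (-1) 'x' ≠ ' ' then xbuf ++ [' '] else xbuf) cap
      else if raw[idx] = ')' then
        if pvSentA xbuf then
          pvNormA raw fuel (idx+1) (PySem.List.pySetD (PySem.List.pySetD xbuf (-2) ')') (-1) ' ' ++ [' ']) cap
        else pvNormA raw fuel (idx+1) (xbuf ++ [')']) cap
      else if pvPunctA raw[idx] then
        if pvSentA xbuf then
          if raw[idx+1]? ≠ some '"' then
            pvNormA raw fuel (idx+1) (PySem.List.pySetD (PySem.List.pySetD xbuf (-2) raw[idx]) (-1) ' ' ++ [' ']) true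
          else
            pvNormA raw fuel (idx+2) (PySem.List.pySetD (PySem.List.pySetD xbuf (-2) raw[idx]) (-1) '"' ++ [' ', ' ']) true
        else
          if raw[idx+1]? ≠ some '"' then pvNormA raw fuel (idx+1) (xbuf ++ [raw[idx], ' ', ' ']) true
          else pvNormA raw fuel (idx+2) (xbuf ++ [raw[idx], '"', ' ', ' ']) true
      else pvNormA raw fuel (idx+1) (xbuf ++ [if cap then PySem.Chars.upperChar raw[idx] else raw[idx]]) false
    else xbuf

-- A's inner `for pos in range(search_limit, 0, -1): if remainder[pos] == " ": break`
def pvScanA (rem : List Char) (pos : Nat) : Option Nat :=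
  match pos with
  | 0 => none
  | p+1 => if PySem.List.pyGetD rem ((p : Int)+1) 'x' = ' ' then some (p+1) else pvScanA rem p

-- A's `while len(remainder) > 77` loop (fuel only makes it total; length+1 is always enough)
def pvWrapA (fuel : Nat) (rem : List Char) (first : Bool) (lines : List (List Char)) :
    List (List Char) × List Char :=
  match fuel with
  | 0 => (lines, rem)
  | fuel+1 =>
    if 77 < rem.length then
      let limit : Nat := if first then 73 else 76
      let searchLimit : Nat := min limit (rem.length - 1)
      match pvScanA rem searchLimit with
      | some b =>
        pvWrapA fuel (List.dropWhile (· == ' ') (PySem.List.slice rem (some ((b : Int)+1)) none)) false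
          (lines ++ [PySem.List.slice rem none (some (b : Int))])
      | none =>
        pvWrapA fuel (PySem.List.slice rem (some 76) none) false
          (lines ++ [PySem.List.slice rem none (some 76) ++ ['-']])
    else (lines, rem)

def format_rom_string (text : Option String) : String :=
  match text with
  | none => ""
  | some t =>
    if t = "" then "" else
    let raw := t.toList
    let collapsed := PySem.Chars.strip (pvNormA raw (raw.length + 1) 0 [] true)
    if collapsed = [] then "" else
    let res := pvWrapA (collapsed.length + 1) collapsed true []
    -- remainder.rstrip(" \n\r"): exact hand port (drop those chars from the reversed list)
    let rem2 := (List.dropWhile (fun c => c == ' ' || c == '\n' || c == '\r') res.2.reverse).reverse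
    let lines := if rem2 ≠ [] then res.1 ++ [rem2] else res.1
    let formatted := PySem.Chars.join ['\n'] lines
    String.ofList (if PySem.Chars.endswith formatted ['\n'] then formatted else formatted ++ ['\n'])

-- ===== PORT B =====

-- `ch in ".?!"` in B
def pvPunctB (c : Char) : Bool := ['.', '?', '!'].contains c

-- B's stage-2 machine, consuming the newline-free char list front to back;
-- `pending` = owed gap spaces, `sent` = the gap is a sentence gap
def pvNormC : List Char → List Char → Bool → Nat → Bool → List Char
  | [], out, _, _, _ => out
  | c :: rest, out, cap, pending, sent =>
    if c = '\r' then pvNormC rest out cap pending sent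
    else if c = ' ' then
      pvNormC rest out cap (if out ≠ [] ∧ pending = 0 then 1 else pending) sent
    else if c = ')' then
      if sent then pvNormC rest (out ++ [')']) cap pending false
      else pvNormC rest (out ++ (List.replicate pending ' ' ++ [')'])) cap 0 sent
    else if pvPunctB c then
      if rest.head? = some '"' then
        pvNormC rest.tail ((if sent then out ++ [c] else out ++ (List.replicate pending ' ' ++ [c])) ++ ['"']) true 2 false
      else
        pvNormC rest (if sent then out ++ [c] else out ++ (List.replicate pending ' ' ++ [c])) true 2 true
    else
      pvNormC rest (out ++ (List.replicate pending ' ' ++ [if cap then PySem.Chars.upperChar c else c])) false 0 false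
  termination_by l => l.length
  decreasing_by all_goals (simp_all [List.length_tail]; try omega)

-- B's forward last-space scan over absolute positions start+1 .. start+limit
-- (every probed position is in range whenever B calls it; out of range reads 'x')
def pvFindBrk (rem : List Char) (i e : Nat) (brk : Int) : Int :=
  if i ≤ e then pvFindBrk rem (i+1) e (if rem[i]?.getD 'x' = ' ' then (i : Int) else brk) else brk
  termination_by e + 1 - i

-- B's `while start < n and rem[start] == " ": start += 1`
def pvSkipSp (rem : List Char) (start : Nat) : Nat :=
  if h : start < rem.length then
    if rem[start] = ' ' then pvSkipSp rem (start+1) else start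
  else start
  termination_by rem.length - start

-- B's stage-3 loop: a start pointer into the one collapsed string
-- (fuel only makes it total; length+1 is always enough)
def pvWrapC (rem : List Char) : Nat → Nat → Bool → List (List Char) → List (List Char)
  | 0, start, _, lines => lines ++ [rem.drop start]
  | fuel+1, start, first, lines =>
    if 77 < rem.length - start then
      let limit : Nat := if first then 73 else 76
      let brk := pvFindBrk rem (start+1) (start+limit) (-1)
      if 0 ≤ brk then
        pvWrapC rem fuel (pvSkipSp rem (brk.toNat+1)) false
          (lines ++ [(rem.drop start).take (brk.toNat - start)])
      else
        pvWrapC rem fuel (start+76) false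
          (lines ++ [(rem.drop start).take 76 ++ ['-']])
    else lines ++ [rem.drop start]

def format_rom_string_alt (text : Option String) : String :=
  match text with
  | none => ""
  | some t =>
    if t = "" then "" else
    -- text.replace("\n", " "): exact for a single-character pattern
    let s := t.toList.map (fun c => if c = '\n' then ' ' else c)
    let rem := PySem.Chars.strip (pvNormC s [] true 0 false)
    if rem = [] then "" else
    String.ofList (PySem.Chars.join ['\n'] (pvWrapC rem (rem.length + 1) 0 true []) ++ ['\n'])

-- ===== PRECONDITION & SPEC =====
def Spec_format_rom_string (text : Option String) (out : String) : Prop := out = format_rom_string_alt text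
instance (text : Option String) (out : String) : Decidable (Spec_format_rom_string text out) := by unfold Spec_format_rom_string; infer_instance

-- ===== CLAIM (what is proved, stated in full; the proofs are below) =====
def Claim_equal_format_rom_string : Prop := ∀ (text : Option String), Dom_format_rom_string text → Spec_format_rom_string text (format_rom_string text)

-- ===== LEMMAS AND PROOFS =====

-- proof-side intermediate: A's machine with the lazy pending/sent state but still
-- fuel/index driven; bridges pvNormA (eager, negative-index rewrites) to pvNormC
def pvNormL (raw : List Char) : Nat → Nat → List Char → Bool → Nat → Bool → List Char
  | 0, _, out, _, _, _ => out
  | fuel+1, i, out, cap, pending, sent =>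
    if h : i < raw.length then
      if raw[i] = '\r' then pvNormL raw fuel (i+1) out cap pending sent
      else if raw[i] = '\n' ∨ raw[i] = ' ' then
        pvNormL raw fuel (i+1) out cap (if out ≠ [] ∧ pending = 0 then 1 else pending) sent
      else if raw[i] = ')' then
        if sent then pvNormL raw fuel (i+1) (out ++ [')']) cap pending false
        else pvNormL raw fuel (i+1) ((out ++ List.replicate pending ' ') ++ [')']) cap 0 sent
      else if pvPunctA raw[i] then
        if raw[i+1]? = some '"' then
          pvNormL raw fuel (i+2)
            ((if sent then out ++ [raw[i]] else (out ++ List.replicate pending ' ') ++ [raw[i]]) ++ ['"']) true 2 false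
        else
          pvNormL raw fuel (i+1)
            (if sent then out ++ [raw[i]] else (out ++ List.replicate pending ' ') ++ [raw[i]]) true 2 true
      else
        pvNormL raw fuel (i+1)
          ((out ++ List.replicate pending ' ') ++ [if cap then PySem.Chars.upperChar raw[i] else raw[i]]) false 0 false
    else out

lemma pv_ne_nil_concat (l : List Char) (h : l ≠ []) : ∃ ys a, l = ys ++ [a] :=
  ⟨l.dropLast, l.getLast h, (List.dropLast_concat_getLast h).symm⟩

lemma pv_upperChar_ne_space {c : Char} (h : c ≠ ' ') : PySem.Chars.upperChar c ≠ ' ' := by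
  unfold PySem.Chars.upperChar PySem.Chars.islower
  split_ifs with hc
  · simp only [Bool.and_eq_true, decide_eq_true_eq] at hc
    have h1 : 97 ≤ c.toNat := by simpa [Char.le_def] using hc.1
    have h2 : c.toNat ≤ 122 := by simpa [Char.le_def] using hc.2
    intro he
    have ht : (Char.ofNat (c.toNat - 32)).toNat = (' ' : Char).toNat := by rw [he]
    rw [Char.toNat_ofNat] at ht
    rw [if_pos (Or.inl (by omega))] at ht
    simp at ht
    omega
  · exact h

lemma pv_punct_ne_space {c : Char} (h : pvPunctA c = true) : c ≠ ' ' := by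
  intro he; subst he; simp [pvPunctA] at h

lemma pv_getD_neg2 (xs : List Char) (a b d : Char) :
    PySem.List.pyGetD (xs ++ [a, b]) (-2) d = a := by
  rw [PySem.List.pyGetD_neg_ofNat (xs ++ [a, b]) 2 d (by omega) (by simp)]
  simp

lemma pv_getD_neg3 (xs : List Char) (l a b d : Char) :
    PySem.List.pyGetD ((xs ++ [l]) ++ [a, b]) (-3) d = l := by
  rw [PySem.List.pyGetD_neg_ofNat ((xs ++ [l]) ++ [a, b]) 3 d (by omega) (by simp)]
  simp

lemma pv_setD_neg1 {α : Type} (xs : List α) (a v : α) :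
    PySem.List.pySetD (xs ++ [a]) (-1) v = xs ++ [v] := by
  have hidx : PySem.List.pyIdx? (xs ++ [a]).length (-1) = some xs.length := by
    unfold PySem.List.pyIdx?
    rw [if_neg (by omega), if_pos (by simp)]
    simp
  simp only [PySem.List.pySetD, PySem.List.pySet?, hidx, Option.map_some, Option.getD_some]
  rw [List.set_append_right _ _ (le_refl _)]
  simp

lemma pv_setD_neg2 {α : Type} (xs : List α) (a b v : α) :
    PySem.List.pySetD (xs ++ [a, b]) (-2) v = xs ++ [v, b] := by
  have hidx : PySem.List.pyIdx? (xs ++ [a, b]).length (-2) = some xs.length := by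
    unfold PySem.List.pyIdx?
    rw [if_neg (by omega), if_pos (by simp)]
    simp
  simp only [PySem.List.pySetD, PySem.List.pySet?, hidx, Option.map_some, Option.getD_some]
  rw [List.set_append_right _ _ (le_refl _)]
  simp

-- A's sentence-gap test, evaluated on the lazy machine's decomposed state
lemma pv_sentA_eval (out : List Char) (pending : Nat) (hp : pending ≤ 2)
    (h0 : out = [] → pending = 0) (hl : out.getLastD 'x' ≠ ' ') :
    pvSentA (out ++ List.replicate pending ' ') =
      (decide (pending = 2) && pvPunctA (out.getLastD 'x')) := by
  interval_cases pending
  · rcases eq_or_ne out [] with rfl | hne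
    · simp [pvSentA]
    · obtain ⟨ys, l, rfl⟩ := pv_ne_nil_concat out hne
      have hlast : PySem.List.pyGetD (ys ++ [l]) (-1) 'x' = l :=
        PySem.List.pyGetD_neg_one_append_singleton ys l 'x'
      have hlne : l ≠ ' ' := by simpa [List.getLastD_concat] using hl
      simp [pvSentA, hlast, hlne]
  · obtain ⟨ys, l, rfl⟩ := pv_ne_nil_concat out (fun he => by have := h0 he; omega)
    have hlne : l ≠ ' ' := by simpa [List.getLastD_concat] using hl
    have e1 : (ys ++ [l]) ++ List.replicate 1 ' ' = ys ++ [l, ' '] := by simp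
    rw [e1]
    have h2 : PySem.List.pyGetD (ys ++ [l, ' ']) (-2) 'x' = l := pv_getD_neg2 ys l ' ' 'x'
    simp [pvSentA, h2, hlne]
  · obtain ⟨ys, l, rfl⟩ := pv_ne_nil_concat out (fun he => by have := h0 he; omega)
    have e2 : (ys ++ [l]) ++ List.replicate 2 ' ' = (ys ++ [l]) ++ [' ', ' '] := by simp
    rw [e2]
    unfold pvSentA
    rw [pv_getD_neg2 (ys ++ [l]) ' ' ' ' 'x', pv_getD_neg3 ys l ' ' ' ' 'x',
      show PySem.List.pyGetD ((ys ++ [l]) ++ [' ', ' ']) (-1) 'x' = ' ' by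
        rw [show (ys ++ [l]) ++ [' ', ' '] = ((ys ++ [l]) ++ [' ']) ++ [' '] by simp]
        exact PySem.List.pyGetD_neg_one_append_singleton _ ' ' 'x']
    simp

lemma pv_dropWhile_rep_append (p : Nat) (l : List Char) :
    List.dropWhile PySem.Chars.isspace (List.replicate p ' ' ++ l) =
      List.dropWhile PySem.Chars.isspace l := by
  induction p with
  | zero => simp
  | succ p ih =>
    simpa [List.replicate_succ,
      List.dropWhile_cons_of_pos (by decide : PySem.Chars.isspace ' ' = true)] using ih

lemma pv_rstrip_append_rep (x : List Char) (p : Nat) :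
    PySem.Chars.rstrip (x ++ List.replicate p ' ') = PySem.Chars.rstrip x := by
  simp only [PySem.Chars.rstrip, List.reverse_append, List.reverse_replicate]
  rw [pv_dropWhile_rep_append]

lemma pv_strip_append_rep (x : List Char) (p : Nat) :
    PySem.Chars.strip (x ++ List.replicate p ' ') = PySem.Chars.strip x := by
  induction x with
  | nil =>
    simp only [List.nil_append, PySem.Chars.strip, PySem.Chars.lstrip]
    have : List.dropWhile PySem.Chars.isspace (List.replicate p ' ') = [] := by
      simpa using pv_dropWhile_rep_append p []
    rw [this]; rfl
  | cons c x ih =>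
    by_cases hc : PySem.Chars.isspace c = true
    · simp only [PySem.Chars.strip, PySem.Chars.lstrip, List.cons_append,
        List.dropWhile_cons_of_pos hc] at *
      exact ih
    · simp only [PySem.Chars.strip, PySem.Chars.lstrip, List.cons_append,
        List.dropWhile_cons_of_neg (by simpa using hc)]
      exact pv_rstrip_append_rep (c :: x) p

-- invariant tying A's buffer (out ++ pending spaces) to the lazy state
def PvNormInv (out : List Char) (pending : Nat) (sent : Bool) : Prop :=
  pending ≤ 2 ∧ (out = [] → pending = 0) ∧ out.getLastD 'x' ≠ ' ' ∧
    sent = (decide (pending = 2) && pvPunctA (out.getLastD 'x'))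

def PvIH (raw : List Char) (k : Nat) : Prop :=
  ∀ (idx : Nat) (out : List Char) (pending : Nat) (cap sent : Bool),
    PvNormInv out pending sent →
    ∃ p, pvNormA raw k idx (out ++ List.replicate pending ' ') cap =
         pvNormL raw k idx out cap pending sent ++ List.replicate p ' '

-- one space/newline step of the two machines
lemma pv_space_step (raw : List Char) (k idx : Nat) (out : List Char) (pending : Nat)
    (cap sent : Bool) (hinv : PvNormInv out pending sent)
    (ih : PvIH raw k) :
    ∃ p, pvNormA raw k (idx+1)
        (if (out ++ List.replicate pending ' ') ≠ [] ∧
            PySem.List.pyGetD (out ++ List.replicate pending ' ') (-1) 'x' ≠ ' '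
          then (out ++ List.replicate pending ' ') ++ [' ']
          else (out ++ List.replicate pending ' ')) cap
      = pvNormL raw k (idx+1) out cap (if out ≠ [] ∧ pending = 0 then 1 else pending) sent
          ++ List.replicate p ' ' := by
  obtain ⟨hp, h0, hl, hs⟩ := hinv
  rcases eq_or_ne out [] with rfl | hone
  · have hp0 : pending = 0 := h0 rfl
    subst hp0
    rw [if_neg (by simp), if_neg (by simp)]
    exact ih (idx+1) [] 0 cap sent ⟨by omega, fun _ => rfl, by decide, hs⟩
  · obtain ⟨ys, l, rfl⟩ := pv_ne_nil_concat out hone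
    interval_cases pending
    · have e0 : (ys ++ [l]) ++ List.replicate 0 ' ' = ys ++ [l] := by simp
      rw [e0]
      have hlne : l ≠ ' ' := by simpa [List.getLastD_concat] using hl
      rw [if_pos ⟨by simp, by
        rw [PySem.List.pyGetD_neg_one_append_singleton]; exact hlne⟩]
      rw [if_pos ⟨by simp, rfl⟩]
      have e1 : (ys ++ [l]) ++ [' '] = (ys ++ [l]) ++ List.replicate 1 ' ' := by simp
      rw [e1]
      refine ih (idx+1) (ys ++ [l]) 1 cap sent ⟨by omega, by simp, hl, ?_⟩
      rw [hs]; simp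
    · have e1 : (ys ++ [l]) ++ List.replicate 1 ' ' = ((ys ++ [l])) ++ [' '] := by simp
      rw [e1]
      rw [if_neg (by
        rintro ⟨-, hgg⟩
        exact hgg (PySem.List.pyGetD_neg_one_append_singleton _ _ _))]
      rw [if_neg (by rintro ⟨-, h1⟩; exact one_ne_zero h1)]
      rw [← e1]
      exact ih (idx+1) (ys ++ [l]) 1 cap sent ⟨by omega, by simp, hl, hs⟩
    · have e2 : (ys ++ [l]) ++ List.replicate 2 ' ' = ((ys ++ [l]) ++ [' ']) ++ [' '] := by simp
      rw [e2]
      rw [if_neg (by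
        rintro ⟨-, hgg⟩
        exact hgg (PySem.List.pyGetD_neg_one_append_singleton _ _ _))]
      rw [if_neg (by rintro ⟨-, h1⟩; exact two_ne_zero h1)]
      rw [← e2]
      exact ih (idx+1) (ys ++ [l]) 2 cap sent ⟨by omega, by simp, hl, hs⟩

lemma pv_norm_succ (raw : List Char) (k : Nat) (ih : PvIH raw k) : PvIH raw (k+1) := by
  intro idx out pending cap sent hinv
  obtain ⟨hp, h0, hl, hs⟩ := hinv
  subst hs
  by_cases h : idx < raw.length
  · rw [pvNormA, pvNormL, dif_pos h, dif_pos h]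
    by_cases hr : raw[idx] = '\r'
    · simp only [if_pos hr]
      exact ih (idx+1) out pending cap _ ⟨hp, h0, hl, rfl⟩
    simp only [if_neg hr]
    by_cases hn : raw[idx] = '\n'
    · simp only [if_pos hn, if_pos (show raw[idx] = '\n' ∨ raw[idx] = ' ' from Or.inl hn)]
      exact pv_space_step raw k idx out pending cap _ ⟨hp, h0, hl, rfl⟩ ih
    simp only [if_neg hn]
    by_cases hsp2 : raw[idx] = ' '
    · simp only [if_pos hsp2, if_pos (show raw[idx] = '\n' ∨ raw[idx] = ' ' from Or.inr hsp2)]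
      exact pv_space_step raw k idx out pending cap _ ⟨hp, h0, hl, rfl⟩ ih
    simp only [if_neg hsp2, if_neg (show ¬(raw[idx] = '\n' ∨ raw[idx] = ' ') by
      rintro (hx | hx); exacts [hn hx, hsp2 hx])]
    have hsA : pvSentA (out ++ List.replicate pending ' ') =
        (decide (pending = 2) && pvPunctA (out.getLastD 'x')) :=
      pv_sentA_eval out pending hp h0 hl
    by_cases hpar : raw[idx] = ')'
    · simp only [if_pos hpar]
      by_cases hP : (decide (pending = 2) && pvPunctA (out.getLastD 'x')) = true
      · have hcond : pvSentA (out ++ List.replicate pending ' ') = true := by rw [hsA]; exact hP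
        simp only [hcond, hP, reduceIte]
        have hP' := hP
        simp only [Bool.and_eq_true, decide_eq_true_eq] at hP'
        obtain ⟨hp2, hpl⟩ := hP'
        subst hp2
        obtain ⟨ys, l, rfl⟩ := pv_ne_nil_concat out (fun he => by have := h0 he; omega)
        have e2 : (ys ++ [l]) ++ List.replicate 2 ' ' = (ys ++ [l]) ++ [' ', ' '] := by simp
        rw [e2, pv_setD_neg2 (ys ++ [l]) ' ' ' ' ')',
          show (ys ++ [l]) ++ [')', ' '] = ((ys ++ [l]) ++ [')']) ++ [' '] by simp,
          pv_setD_neg1]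
        obtain ⟨p, hpe⟩ := ih (idx+1) ((ys ++ [l]) ++ [')']) 2 cap false
          ⟨by omega, by simp, by rw [List.getLastD_concat]; decide,
           by rw [List.getLastD_concat]; decide⟩
        exact ⟨p, by simpa using hpe⟩
      · have hPf : (decide (pending = 2) && pvPunctA (out.getLastD 'x')) = false :=
          Bool.eq_false_iff.mpr hP
        have hcond : pvSentA (out ++ List.replicate pending ' ') = false := by rw [hsA]; exact hPf
        simp only [hcond, hPf]
        obtain ⟨p, hpe⟩ := ih (idx+1) ((out ++ List.replicate pending ' ') ++ [')']) 0 cap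
          false
          ⟨by omega, by simp, by rw [List.getLastD_concat]; decide, by simp⟩
        exact ⟨p, by simpa using hpe⟩
    simp only [if_neg hpar]
    by_cases hq : pvPunctA raw[idx] = true
    · simp only [if_pos hq]
      by_cases hP : (decide (pending = 2) && pvPunctA (out.getLastD 'x')) = true
      · have hcond : pvSentA (out ++ List.replicate pending ' ') = true := by rw [hsA]; exact hP
        simp only [hcond, hP, reduceIte]
        have hP' := hP
        simp only [Bool.and_eq_true, decide_eq_true_eq] at hP'
        obtain ⟨hp2, hpl⟩ := hP'
        subst hp2
        obtain ⟨ys, l, rfl⟩ := pv_ne_nil_concat out (fun he => by have := h0 he; omega)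
        have e2 : (ys ++ [l]) ++ List.replicate 2 ' ' = (ys ++ [l]) ++ [' ', ' '] := by simp
        rw [e2, pv_setD_neg2 (ys ++ [l]) ' ' ' ' raw[idx],
          show (ys ++ [l]) ++ [raw[idx], ' '] = ((ys ++ [l]) ++ [raw[idx]]) ++ [' '] by simp,
          pv_setD_neg1, pv_setD_neg1]
        by_cases hquote : raw[idx+1]? = some '"'
        · simp only [if_pos hquote, if_neg (not_not_intro hquote)]
          obtain ⟨p, hpe⟩ := ih (idx+2) (((ys ++ [l]) ++ [raw[idx]]) ++ ['"']) 2 true false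
            ⟨by omega, by simp, by rw [List.getLastD_concat]; decide,
             by rw [List.getLastD_concat]; decide⟩
          exact ⟨p, by simpa using hpe⟩
        · simp only [if_pos hquote, if_neg hquote]
          obtain ⟨p, hpe⟩ := ih (idx+1) ((ys ++ [l]) ++ [raw[idx]]) 2 true true
            ⟨by omega, by simp, by rw [List.getLastD_concat]; exact pv_punct_ne_space hq,
             by rw [List.getLastD_concat]; simp [hq]⟩
          exact ⟨p, by simpa using hpe⟩
      · have hPf : (decide (pending = 2) && pvPunctA (out.getLastD 'x')) = false :=
          Bool.eq_false_iff.mpr hP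
        have hcond : pvSentA (out ++ List.replicate pending ' ') = false := by rw [hsA]; exact hPf
        simp only [hcond, hPf]
        by_cases hquote : raw[idx+1]? = some '"'
        · simp only [if_pos hquote, if_neg (not_not_intro hquote)]
          obtain ⟨p, hpe⟩ := ih (idx+2)
            (((out ++ List.replicate pending ' ') ++ [raw[idx]]) ++ ['"']) 2 true false
            ⟨by omega, by simp, by rw [List.getLastD_concat]; decide,
             by rw [List.getLastD_concat]; decide⟩
          exact ⟨p, by simpa using hpe⟩
        · simp only [if_pos hquote, if_neg hquote]
          obtain ⟨p, hpe⟩ := ih (idx+1) ((out ++ List.replicate pending ' ') ++ [raw[idx]]) 2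
            true true
            ⟨by omega, by simp, by rw [List.getLastD_concat]; exact pv_punct_ne_space hq,
             by rw [List.getLastD_concat]; simp [hq]⟩
          exact ⟨p, by simpa using hpe⟩
    · simp only [if_neg hq]
      obtain ⟨p, hpe⟩ := ih (idx+1)
        ((out ++ List.replicate pending ' ') ++
          [if cap then PySem.Chars.upperChar raw[idx] else raw[idx]])
        0 false false
        ⟨by omega, by simp, by
          rw [List.getLastD_concat]
          by_cases hcap : cap = true
          · simp only [hcap, reduceIte]; exact pv_upperChar_ne_space hsp2
          · simp only [if_neg hcap]; exact hsp2, by simp⟩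
      exact ⟨p, by simpa using hpe⟩
  · rw [pvNormA, pvNormL, dif_neg h, dif_neg h]
    exact ⟨pending, rfl⟩

lemma pv_norm_ih (raw : List Char) : ∀ (k : Nat), PvIH raw k := by
  intro k
  induction k with
  | zero => intro idx out pending cap sent hinv; exact ⟨pending, rfl⟩
  | succ k ih => exact pv_norm_succ raw k ih

-- the lazy fuel/index machine equals B's structural machine on the '\n'-to-space mapped tail
lemma pv_normL_to_C (raw : List Char) :
    ∀ (fuel idx : Nat) (out : List Char) (cap : Bool) (pending : Nat) (sent : Bool),
      raw.length ≤ idx + fuel →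
      pvNormL raw fuel idx out cap pending sent =
        pvNormC ((raw.drop idx).map (fun c => if c = '\n' then ' ' else c)) out cap pending sent := by
  intro fuel
  induction fuel with
  | zero =>
    intro idx out cap pending sent hle
    rw [pvNormL, List.drop_of_length_le (by omega), List.map_nil, pvNormC]
  | succ fuel ih =>
    intro idx out cap pending sent hle
    by_cases h : idx < raw.length
    · have hd : raw.drop idx = raw[idx] :: raw.drop (idx+1) := List.drop_eq_getElem_cons h
      rw [pvNormL, dif_pos h, hd, List.map_cons]
      by_cases hn : raw[idx] = '\n'
      · rw [if_pos hn]
        simp only [pvNormC]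
        rw [if_pos trivial]
        rw [if_neg (by rw [hn]; decide), if_pos (Or.inl hn)]
        exact ih (idx+1) out cap _ sent (by omega)
      · rw [if_neg hn]
        simp only [pvNormC]
        by_cases hr : raw[idx] = '\r'
        · simp only [if_pos hr]
          exact ih (idx+1) out cap pending sent (by omega)
        simp only [if_neg hr]
        by_cases hsp : raw[idx] = ' '
        · simp only [if_pos hsp, if_pos (show raw[idx] = '\n' ∨ raw[idx] = ' ' from Or.inr hsp)]
          exact ih (idx+1) out cap _ sent (by omega)
        simp only [if_neg hsp, if_neg (show ¬(raw[idx] = '\n' ∨ raw[idx] = ' ') by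
          rintro (h1 | h1); exacts [hn h1, hsp h1])]
        by_cases hpar : raw[idx] = ')'
        · simp only [if_pos hpar]
          by_cases hsent : sent = true
          · simp only [hsent, reduceIte]
            exact ih (idx+1) (out ++ [')']) cap pending false (by omega)
          · have hsf : sent = false := Bool.eq_false_iff.mpr hsent
            simp only [hsf, Bool.false_eq_true]
            rw [← List.append_assoc]
            exact ih (idx+1) ((out ++ List.replicate pending ' ') ++ [')']) cap 0 false (by omega)
        simp only [if_neg hpar]
        by_cases hq : pvPunctA raw[idx] = true
        · have hqB : pvPunctB raw[idx] = true := by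
            revert hq; simp [pvPunctA, pvPunctB]; tauto
          simp only [if_pos hq, if_pos hqB]
          have hhead : ((raw.drop (idx+1)).map (fun c => if c = '\n' then ' ' else c)).head? =
              (raw.drop (idx+1)).head?.map (fun c => if c = '\n' then ' ' else c) := by
            rw [List.head?_map]
          have hhd2 : (raw.drop (idx+1)).head? = raw[idx+1]? := by
            simp [List.head?_drop]
          have hquoteiff :
              (((raw.drop (idx+1)).map (fun c => if c = '\n' then ' ' else c)).head? = some '"') ↔
                raw[idx+1]? = some '"' := by
            rw [hhead, hhd2]
            cases hx : raw[idx+1]? with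
            | none => simp
            | some c =>
              simp only [Option.map_some, Option.some_inj]
              constructor
              · intro hc
                by_cases hnl : c = '\n'
                · rw [hnl] at hc; simp at hc
                · simpa [hnl] using hc
              · intro hc; simp [hc]
          have harr : (if sent = true then out ++ [raw[idx]]
              else (out ++ List.replicate pending ' ') ++ [raw[idx]]) =
              (if sent = true then out ++ [raw[idx]]
              else out ++ (List.replicate pending ' ' ++ [raw[idx]])) := by
            split_ifs <;> simp
          by_cases hquote : raw[idx+1]? = some '"'
          · rw [if_pos hquote, if_pos (hquoteiff.mpr hquote)]
            have htail : ((raw.drop (idx+1)).map (fun c => if c = '\n' then ' ' else c)).tail =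
                (raw.drop (idx+2)).map (fun c => if c = '\n' then ' ' else c) := by
              rw [← List.map_tail, List.tail_drop]
            rw [htail, harr]
            exact ih (idx+2) _ true 2 false (by omega)
          · rw [if_neg hquote, if_neg (fun hc => hquote (hquoteiff.mp hc)), harr]
            exact ih (idx+1) _ true 2 true (by omega)
        · have hqB : ¬ pvPunctB raw[idx] = true := by
            revert hq; simp [pvPunctA, pvPunctB]; tauto
          simp only [if_neg hq, if_neg hqB]
          rw [← List.append_assoc]
          exact ih (idx+1) _ false 0 false (by omega)
    · rw [pvNormL, dif_neg h, List.drop_of_length_le (by omega), List.map_nil, pvNormC]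

lemma pv_scanA_bounds (rem : List Char) :
    ∀ (pos b : Nat), pvScanA rem pos = some b → 1 ≤ b ∧ b ≤ pos := by
  intro pos
  induction pos with
  | zero => intro b hb; simp [pvScanA] at hb
  | succ p ih =>
    intro b hb
    rw [pvScanA] at hb
    split at hb
    · cases hb; omega
    · have := ih b hb; omega

-- explicit step/stop unfoldings of the forward scan
lemma pv_findBrk_step (rem : List Char) (i e : Nat) (brk : Int) (h : i ≤ e) :
    pvFindBrk rem i e brk =
      pvFindBrk rem (i+1) e (if rem[i]?.getD 'x' = ' ' then (i : Int) else brk) := by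
  rw [pvFindBrk, if_pos h]

lemma pv_findBrk_stop (rem : List Char) (i e : Nat) (brk : Int) (h : e < i) :
    pvFindBrk rem i e brk = brk := by
  rw [pvFindBrk, if_neg (by omega)]

-- peel the TOP index off the forward scan: the LAST space wins
lemma pv_findBrk_peel (rem : List Char) :
    ∀ (d i : Nat) (brk : Int), pvFindBrk rem i (i+d+1) brk =
      if rem[i+d+1]?.getD 'x' = ' ' then ((i+d+1 : Nat) : Int)
      else pvFindBrk rem i (i+d) brk := by
  intro d
  induction d with
  | zero =>
    intro i brk
    simp only [Nat.add_zero]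
    rw [pv_findBrk_step rem i (i+1) brk (by omega),
      pv_findBrk_step rem (i+1) (i+1) _ (le_refl _),
      pv_findBrk_stop rem (i+2) (i+1) _ (by omega)]
    rw [pv_findBrk_step rem i i brk (le_refl i),
      pv_findBrk_stop rem (i+1) i _ (by omega)]
  | succ d ih =>
    intro i brk
    rw [pv_findBrk_step rem i (i+(d+1)+1) brk (by omega)]
    rw [show i+(d+1)+1 = (i+1)+d+1 by omega]
    rw [ih (i+1)]
    rw [pv_findBrk_step rem i (i+(d+1)) brk (by omega)]
    rw [show i+(d+1) = (i+1)+d by omega]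

-- pyGetD on the sliced-off remainder vs an absolute index
lemma pv_getD_drop (rem : List Char) (start j : Nat) :
    PySem.List.pyGetD (rem.drop start) ((j : Nat) : Int) 'x' = rem[start+j]?.getD 'x' := by
  rw [PySem.List.pyGetD_natCast, List.getD_eq_getElem?_getD, List.getElem?_drop]

-- B's forward absolute scan vs A's backward relative scan
lemma pv_scan_bridge (rem : List Char) (start : Nat) :
    ∀ (limit : Nat),
      pvFindBrk rem (start+1) (start+limit) (-1) =
        (match pvScanA (rem.drop start) limit with
         | some b => ((start + b : Nat) : Int)
         | none => -1) := by
  intro limit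
  induction limit with
  | zero =>
    rw [pvFindBrk, if_neg (by omega)]
    simp [pvScanA]
  | succ l ih =>
    rw [pvScanA,
      show ((l : Int)+1) = ((l+1 : Nat) : Int) by push_cast; ring,
      pv_getD_drop rem start (l+1)]
    cases l with
    | zero =>
      rw [pvFindBrk, if_pos (by omega), pvFindBrk, if_neg (by omega)]
      by_cases hsp : rem[start+1]?.getD 'x' = ' '
      · rw [if_pos (by simpa using hsp), if_pos (by simpa using hsp)]
      · rw [if_neg (by simpa using hsp), if_neg (by simpa using hsp)]
        simp [pvScanA]
    | succ l' =>
      rw [show start + (l'+1+1) = (start+1) + l' + 1 by omega, pv_findBrk_peel]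
      rw [show (start+1) + l' + 1 = start + (l'+1+1) by omega,
        show (start+1) + l' = start + (l'+1) by omega]
      by_cases hsp : rem[start + (l'+1+1)]?.getD 'x' = ' '
      · rw [if_pos hsp, if_pos hsp]
      · rw [if_neg hsp, if_neg hsp, ih]

-- B's in-place space skip vs A's lstrip on the sliced-off remainder
lemma pv_skip_bridge (rem : List Char) :
    ∀ (s : Nat), rem.drop (pvSkipSp rem s) = List.dropWhile (· == ' ') (rem.drop s) := by
  intro s
  by_cases h : s < rem.length
  · have hd : rem.drop s = rem[s] :: rem.drop (s+1) := List.drop_eq_getElem_cons h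
    rw [pvSkipSp, dif_pos h]
    by_cases hsp : rem[s] = ' '
    · rw [if_pos hsp, hd, List.dropWhile_cons_of_pos (by simp [hsp])]
      exact pv_skip_bridge rem (s+1)
    · rw [if_neg hsp, hd, List.dropWhile_cons_of_neg (by simp [hsp]), ← hd]
  · rw [pvSkipSp, dif_neg h, List.drop_of_length_le (by omega)]
    simp
  termination_by s => rem.length - s
  decreasing_by omega

-- A's slice-off wrap loop produces exactly B's pointer-walk lines
lemma pv_wrap_bridge (rem : List Char) :
    ∀ (fuel start : Nat) (first : Bool) (lines : List (List Char)),
      pvWrapC rem fuel start first lines =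
        (pvWrapA fuel (rem.drop start) first lines).1 ++ [(pvWrapA fuel (rem.drop start) first lines).2] := by
  intro fuel
  induction fuel with
  | zero => intro start first lines; rw [pvWrapC, pvWrapA]
  | succ fuel ih =>
    intro start first lines
    rw [pvWrapC, pvWrapA]
    have hlen : (rem.drop start).length = rem.length - start := List.length_drop
    by_cases h77 : 77 < rem.length - start
    · rw [if_pos h77, if_pos (by omega : 77 < (rem.drop start).length)]
      have hlim : (if first then (73:Nat) else 76) ≤ 76 := by split <;> omega
      have hmin : min (if first then (73:Nat) else 76) ((rem.drop start).length - 1) =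
          (if first then (73:Nat) else 76) := by omega
      simp only [hmin]
      have hbrk := pv_scan_bridge rem start (if first then (73:Nat) else 76)
      cases hA : pvScanA (rem.drop start) (if first then (73:Nat) else 76) with
      | some b =>
        rw [hA] at hbrk
        simp only at hbrk
        rw [hbrk, if_pos (Int.natCast_nonneg _)]
        have htn : ((start + b : Nat) : Int).toNat = start + b := Int.toNat_natCast _
        rw [htn]
        have hline : (rem.drop start).take (start + b - start) =
            PySem.List.slice (rem.drop start) none (some ((b : Nat) : Int)) := by
          rw [PySem.List.slice_to_natCast]
          congr 1
          omega
        rw [hline]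
        have hrem2 : rem.drop (pvSkipSp rem (start + b + 1)) =
            List.dropWhile (· == ' ') (PySem.List.slice (rem.drop start) (some ((b:Int)+1)) none) := by
          rw [show ((b:Int)+1) = ((b+1 : Nat) : Int) by push_cast; ring,
            PySem.List.slice_from_natCast, List.drop_drop, pv_skip_bridge]
          congr 2
        have hih := ih (pvSkipSp rem (start + b + 1)) false
          (lines ++ [PySem.List.slice (rem.drop start) none (some ((b : Nat) : Int))])
        rw [hrem2] at hih
        exact hih
      | none =>
        rw [hA] at hbrk
        simp only at hbrk
        rw [hbrk, if_neg (by omega : ¬ (0:Int) ≤ -1)]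
        have h76 : rem.drop (start+76) = PySem.List.slice (rem.drop start) (some (76:Int)) none := by
          rw [show (76:Int) = ((76:Nat):Int) by norm_num, PySem.List.slice_from_natCast,
            List.drop_drop]
        have hl76 : (rem.drop start).take 76 = PySem.List.slice (rem.drop start) none (some (76:Int)) := by
          rw [show (76:Int) = ((76:Nat):Int) by norm_num, PySem.List.slice_to_natCast]
        rw [hl76]
        have hih := ih (start+76) false
          (lines ++ [PySem.List.slice (rem.drop start) none (some (76:Int)) ++ ['-']])
        rw [h76] at hih
        exact hih
    · rw [if_neg h77, if_neg (by omega : ¬ 77 < (rem.drop start).length)]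

lemma pv_getLastD_eq_getLast (l : List Char) (d : Char) (h : l ≠ []) :
    l.getLastD d = l.getLast h := by
  rw [List.getLastD_eq_getLast?, List.getLast?_eq_some_getLast h]; rfl

lemma pv_getLastD_suffix {s l : List Char} (d : Char) (hs : s <:+ l) (h : s ≠ []) :
    s.getLastD d = l.getLastD d := by
  obtain ⟨t, rfl⟩ := hs
  obtain ⟨ys, a, rfl⟩ := pv_ne_nil_concat s h
  rw [← List.append_assoc, List.getLastD_concat, List.getLastD_concat]

lemma pv_dropWhile_cons_false {p : Char → Bool} {l : List Char} {a : Char} {t : List Char}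
    (h : l.dropWhile p = a :: t) : p a = false := by
  induction l with
  | nil => simp at h
  | cons c cs ih =>
    rw [List.dropWhile_cons] at h
    split at h
    · exact ih h
    · cases h
      next hc => exact Bool.not_eq_true _ ▸ (by simpa using hc)

lemma pv_strip_last (s : List Char) (h : PySem.Chars.strip s ≠ []) :
    PySem.Chars.isspace ((PySem.Chars.strip s).getLastD 'x') = false := by
  unfold PySem.Chars.strip PySem.Chars.rstrip at *
  cases hzz : List.dropWhile PySem.Chars.isspace (PySem.Chars.lstrip s).reverse with
  | nil => rw [hzz] at h; simp at h
  | cons a t =>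
    have ha : PySem.Chars.isspace a = false := pv_dropWhile_cons_false hzz
    rw [List.reverse_cons, List.getLastD_concat]
    exact ha

lemma pv_wrapA_inv :
    ∀ (fuel : Nat) (rem : List Char) (first : Bool) (lines : List (List Char)),
    rem ≠ [] → PySem.Chars.isspace (rem.getLastD 'x') = false →
    (pvWrapA fuel rem first lines).2 ≠ [] ∧
      PySem.Chars.isspace ((pvWrapA fuel rem first lines).2.getLastD 'x') = false := by
  intro fuel
  induction fuel with
  | zero => intro rem first lines hne hsp; exact ⟨hne, hsp⟩
  | succ fuel ih =>
    intro rem first lines hne hsp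
    rw [pvWrapA]
    by_cases h77 : 77 < rem.length
    · simp only [if_pos h77]
      have hlim : (if first then (73:Nat) else 76) ≤ 76 := by split <;> omega
      have hstep : ∀ (k : Nat), k ≤ 77 →
          (rem.drop k ≠ [] ∧ PySem.Chars.isspace ((rem.drop k).getLastD 'x') = false) := by
        intro k hk
        have hdne : rem.drop k ≠ [] := by
          intro h0
          have := List.length_drop (l := rem) (i := k)
          rw [h0] at this; simp at this; omega
        exact ⟨hdne, by rw [pv_getLastD_suffix 'x' (List.drop_suffix k rem) hdne]; exact hsp⟩
      cases hA : pvScanA rem (min (if first then (73:Nat) else 76) (rem.length - 1)) with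
      | some b =>
        have hb := pv_scanA_bounds rem _ b hA
        have hbb : b ≤ 76 := by
          have := hb.2
          have : b ≤ min (if first then (73:Nat) else 76) (rem.length - 1) := this
          omega
        simp only [hA]
        have hslice : PySem.List.slice rem (some ((b : Int) + 1)) none = rem.drop (b+1) := by
          rw [show ((b:Int)+1) = ((b+1:Nat):Int) by push_cast; ring]
          exact PySem.List.slice_from_natCast _ _
        obtain ⟨hdne, hdsp⟩ := hstep (b+1) (by omega)
        have hlastne : (rem.drop (b+1)).getLastD 'x' ≠ ' ' := by
          intro he; rw [he] at hdsp; exact absurd hdsp (by decide)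
        have hwne : List.dropWhile (· == ' ') (rem.drop (b+1)) ≠ [] := by
          intro h0
          rw [List.dropWhile_eq_nil_iff] at h0
          have hmem : (rem.drop (b+1)).getLastD 'x' ∈ rem.drop (b+1) := by
            rw [pv_getLastD_eq_getLast _ _ hdne]; exact List.getLast_mem hdne
          have := h0 _ hmem
          exact hlastne (by simpa using this)
        have hwlast : (List.dropWhile (· == ' ') (rem.drop (b+1))).getLastD 'x' =
            (rem.drop (b+1)).getLastD 'x' :=
          pv_getLastD_suffix 'x' (List.dropWhile_suffix _) hwne
        rw [hslice]
        exact ih _ _ _ hwne (by rw [hwlast]; exact hdsp)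
      | none =>
        simp only [hA]
        have hslice : PySem.List.slice rem (some (76 : Int)) none = rem.drop 76 := by
          rw [show (76:Int) = ((76:Nat):Int) by norm_num]
          exact PySem.List.slice_from_natCast _ _
        obtain ⟨hdne, hdsp⟩ := hstep 76 (by omega)
        rw [hslice]
        exact ih _ _ _ hdne hdsp
    · simp only [if_neg h77]
      exact ⟨hne, hsp⟩

lemma pv_join_tail (sep rem : List Char) (lines : List (List Char)) :
    ∃ u, PySem.Chars.join sep (lines ++ [rem]) = u ++ rem := by
  induction lines with
  | nil => exact ⟨[], by simp [PySem.Chars.join_singleton]⟩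
  | cons x ls ih =>
    obtain ⟨u, hu⟩ := ih
    cases hls : ls ++ [rem] with
    | nil => simp at hls
    | cons y t =>
      refine ⟨x ++ sep ++ u, ?_⟩
      rw [List.cons_append, hls, PySem.Chars.join_cons_cons, ← hls, hu]
      simp

-- ===== VERDICT (by name: the statement is the Claim_ definition above) =====
theorem format_rom_string_spec : Claim_equal_format_rom_string := by
  unfold Claim_equal_format_rom_string Spec_format_rom_string
  intro text _
  cases text with
  | none => rfl
  | some t =>
    simp only [format_rom_string, format_rom_string_alt]
    by_cases ht : t = ""
    · rw [if_pos ht, if_pos ht]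
    · rw [if_neg ht, if_neg ht]
      obtain ⟨p, hpeq⟩ := pv_norm_ih t.toList (t.toList.length + 1) 0 [] 0 true false
        ⟨by omega, fun _ => rfl, by decide, by decide⟩
      have hLC : pvNormL t.toList (t.toList.length + 1) 0 [] true 0 false =
          pvNormC (t.toList.map (fun c => if c = '\n' then ' ' else c)) [] true 0 false := by
        have := pv_normL_to_C t.toList (t.toList.length + 1) 0 [] true 0 false (by omega)
        simpa using this
      have hcol : PySem.Chars.strip (pvNormA t.toList (t.toList.length + 1) 0 [] true) =
          PySem.Chars.strip (pvNormC (t.toList.map (fun c => if c = '\n' then ' ' else c)) [] true 0 false) := by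
        have h2 : pvNormA t.toList (t.toList.length + 1) 0 [] true =
            pvNormC (t.toList.map (fun c => if c = '\n' then ' ' else c)) [] true 0 false
              ++ List.replicate p ' ' := by
          have := hpeq
          simp only [List.nil_append, List.replicate_zero] at this
          rw [this, hLC]
        rw [h2, pv_strip_append_rep]
      rw [hcol]
      set rem := PySem.Chars.strip
        (pvNormC (t.toList.map (fun c => if c = '\n' then ' ' else c)) [] true 0 false) with hremdef
      by_cases hc : rem = []
      · rw [if_pos hc, if_pos hc]
      · rw [if_neg hc, if_neg hc]
        have hwb := pv_wrap_bridge rem (rem.length + 1) 0 true []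
        rw [List.drop_zero] at hwb
        rw [hwb]
        obtain ⟨hne, hsp⟩ := pv_wrapA_inv (rem.length + 1) rem true [] hc (pv_strip_last _ hc)
        set res := pvWrapA (rem.length + 1) rem true [] with hres
        obtain ⟨ys, a, hra⟩ := pv_ne_nil_concat res.2 hne
        have hsa : PySem.Chars.isspace a = false := by
          rw [hra, List.getLastD_concat] at hsp; exact hsp
        have hba : (a == ' ' || a == '\n' || a == '\r') = false := by
          by_cases h1 : a = ' '
          · rw [h1] at hsa; exact absurd hsa (by decide)
          by_cases h2 : a = '\n'
          · rw [h2] at hsa; exact absurd hsa (by decide)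
          by_cases h3 : a = '\r'
          · rw [h3] at hsa; exact absurd hsa (by decide)
          simp [h1, h2, h3]
        have hrs : (List.dropWhile (fun c => c == ' ' || c == '\n' || c == '\r')
            res.2.reverse).reverse = res.2 := by
          rw [hra, List.reverse_append,
            show ([a].reverse ++ ys.reverse) = a :: ys.reverse by simp,
            List.dropWhile_cons, if_neg (by rw [hba]; exact Bool.false_ne_true)]
          simp
        rw [hrs]
        rw [if_pos hne]
        obtain ⟨u, hu⟩ := pv_join_tail ['\n'] res.2 res.1
        have hend : PySem.Chars.endswith (PySem.Chars.join ['\n'] (res.1 ++ [res.2])) ['\n']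
            = false := by
          cases hE : PySem.Chars.endswith (PySem.Chars.join ['\n'] (res.1 ++ [res.2])) ['\n'] with
          | false => rfl
          | true =>
            obtain ⟨tl, htl⟩ := (PySem.Chars.endswith_iff _ _).mp hE
            have hlast : (PySem.Chars.join ['\n'] (res.1 ++ [res.2])).getLastD 'x' = '\n' := by
              rw [← htl, List.getLastD_concat]
            rw [hu] at hlast
            have h2 : res.2.getLastD 'x' = '\n' :=
              (pv_getLastD_suffix 'x' ⟨u, rfl⟩ hne).trans hlast
            rw [hra, List.getLastD_concat] at h2
            rw [h2] at hsa
            exact absurd hsa (by decide)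
        rw [hend, if_neg Bool.false_ne_true]
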